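-- pv_equiv track=rewrite | github.com/kmoon0001/spec-kit-analyzer | src/ner_service.py | _find_sentence_for_entity
-- ===== SOURCE A (Python) =====
-- from typing import List, Dict, Any, Optional
--
-- def _find_sentence_for_entity(entity: Dict[str, Any], sentences: List[str], full_text: str) -> str:
--     """Finds the full sentence that contains the given entity."""
--     char_offset = 0
--     for sentence in sentences:
--         sentence_start = char_offset
--         sentence_end = char_offset + len(sentence)
--         if sentence_start <= entity['start'] < sentence_end:
--             return sentence
--         char_offset += len(sentence) + 1
--     return ""
-- ===== SOURCE B (Python) =====
-- def _bisect_right(a, x):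
--     lo, hi = 0, len(a)
--     while lo < hi:
--         mid = (lo + hi) // 2
--         if x < a[mid]:
--             hi = mid
--         else:
--             lo = mid + 1
--     return lo
--
-- def _find_sentence_for_entity(entity, sentences, full_text):
--     """Finds the full sentence that contains the given entity (prefix table + binary search)."""
--     starts = []
--     offset = 0
--     for sentence in sentences:
--         starts.append(offset)
--         offset += len(sentence) + 1
--     pos = entity['start']
--     idx = _bisect_right(starts, pos) - 1
--     if idx >= 0 and pos < starts[idx] + len(sentences[idx]):
--         return sentences[idx]
--     return ""
-- ===== Notes on version B (the rewrite author's own statement) =====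
-- stated objective: alternative
-- what changed: Replaces the single linear scan that accumulates char_offset inline with a prefix table of sentence start offsets followed by a binary search (bisect_right) and one containment check.
-- outside the precondition, e.g. on _find_sentence_for_entity({}, [], ''): A returns '', B raises KeyError
import Mathlib
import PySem

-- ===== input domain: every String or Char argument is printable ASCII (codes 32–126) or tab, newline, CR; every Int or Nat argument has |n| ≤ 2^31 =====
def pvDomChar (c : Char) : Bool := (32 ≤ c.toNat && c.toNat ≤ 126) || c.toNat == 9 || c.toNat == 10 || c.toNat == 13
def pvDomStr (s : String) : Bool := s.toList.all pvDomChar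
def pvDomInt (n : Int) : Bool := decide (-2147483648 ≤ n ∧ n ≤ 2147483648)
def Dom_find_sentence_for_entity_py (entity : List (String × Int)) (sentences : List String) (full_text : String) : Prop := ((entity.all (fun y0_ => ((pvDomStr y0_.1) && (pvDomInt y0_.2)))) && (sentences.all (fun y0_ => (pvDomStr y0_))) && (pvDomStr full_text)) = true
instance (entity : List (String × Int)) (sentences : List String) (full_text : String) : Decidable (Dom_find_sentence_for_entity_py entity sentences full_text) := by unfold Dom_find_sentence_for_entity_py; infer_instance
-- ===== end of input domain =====

-- B builds an explicit prefix table of sentence start offsets and locates the entity with a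
-- binary search (bisect_right) plus one containment check, instead of A's linear scan that
-- accumulates char_offset inline (objective: alternative decomposition).

-- ===== PORT A =====
-- A's for-loop over sentences, carrying char_offset; entity['start'] is passed in as pos.
def pvA_loop (pos : Int) : Int → List String → String
  | _, [] => ""
  | off, s :: rest =>
    if off ≤ pos ∧ pos < off + PySem.Str.len s then s
    else pvA_loop pos (off + PySem.Str.len s + 1) rest

def find_sentence_for_entity_py (entity : List (String × Int)) (sentences : List String) (full_text : String) : String :=
  -- entity['start']: KeyError (missing key) is excluded by Pre_, so the default is never used
  let pos := ((PySem.Dict.mk entity).get? "start").getD 0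
  pvA_loop pos 0 sentences

-- ===== PORT B =====
-- B's first loop: starts.append(offset); offset += len(sentence) + 1
def pvB_starts (off : Int) : List String → List Int
  | [] => []
  | s :: rest => off :: pvB_starts (off + PySem.Str.len s + 1) rest

def find_sentence_for_entity_py_alt (entity : List (String × Int)) (sentences : List String) (full_text : String) : String :=
  let pos := ((PySem.Dict.mk entity).get? "start").getD 0
  let starts := pvB_starts 0 sentences
  let k := PySem.List.bisectRight starts pos      -- idx = k - 1; idx >= 0 iff k ≠ 0
  if k = 0 then ""
  else if pos < starts.getD (k - 1) 0 + PySem.Str.len (sentences.getD (k - 1) "") then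
    sentences.getD (k - 1) ""
  else ""

-- ===== PRECONDITION & SPEC =====
-- Pre_ excludes entities lacking a 'start' key: A raises KeyError on them except when sentences
-- is empty (the loop never reads the key and A returns ''), while B always reads the key and raises.
def Pre_find_sentence_for_entity_py (entity : List (String × Int)) (sentences : List String) (full_text : String) : Prop :=
  (PySem.Dict.mk entity).contains "start" = true
instance (entity : List (String × Int)) (sentences : List String) (full_text : String) : Decidable (Pre_find_sentence_for_entity_py entity sentences full_text) := by unfold Pre_find_sentence_for_entity_py; infer_instance

def pvWitness_find_sentence_for_entity_py : (List (String × Int)) × List String × String :=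
  ([("start", 4)], ["ab", "cd"], "ab cd")

def Spec_find_sentence_for_entity_py (entity : List (String × Int)) (sentences : List String) (full_text : String) (out : String) : Prop := out = find_sentence_for_entity_py_alt entity sentences full_text
instance (entity : List (String × Int)) (sentences : List String) (full_text : String) (out : String) : Decidable (Spec_find_sentence_for_entity_py entity sentences full_text out) := by unfold Spec_find_sentence_for_entity_py; infer_instance

-- ===== CLAIM (what is proved, stated in full; the proofs are below) =====
def Claim_equal_find_sentence_for_entity_py : Prop := ∀ (entity : List (String × Int)) (sentences : List String) (full_text : String), Dom_find_sentence_for_entity_py entity sentences full_text → Pre_find_sentence_for_entity_py entity sentences full_text → Spec_find_sentence_for_entity_py entity sentences full_text (find_sentence_for_entity_py entity sentences full_text)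

-- ===== LEMMAS AND PROOFS =====

theorem pvLen_nonneg (s : String) : 0 ≤ PySem.Str.len s := by
  simp [PySem.Str.len]

-- B's computation with bisectRight replaced by the length of the (· ≤ pos) prefix
def pvBAns (pos : Int) (starts : List Int) (sents : List String) : String :=
  let k := (starts.takeWhile (fun a => decide (a ≤ pos))).length
  if k = 0 then ""
  else if pos < starts.getD (k - 1) 0 + PySem.Str.len (sents.getD (k - 1) "") then
    sents.getD (k - 1) ""
  else ""

-- every start offset produced from off is ≥ off
theorem pvB_starts_ge (l : List String) (off : Int) :
    ∀ a ∈ pvB_starts off l, off ≤ a := by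
  induction l generalizing off with
  | nil => simp [pvB_starts]
  | cons s rest ih =>
    intro a ha
    simp only [pvB_starts, List.mem_cons] at ha
    rcases ha with rfl | ha
    · exact le_refl a
    · have := ih (off + PySem.Str.len s + 1) a ha
      have := pvLen_nonneg s
      omega

theorem pvB_starts_sorted (l : List String) (off : Int) :
    List.Pairwise (fun a b => a ≤ b) (pvB_starts off l) := by
  induction l generalizing off with
  | nil => simp [pvB_starts]
  | cons s rest ih =>
    simp only [pvB_starts]
    refine List.pairwise_cons.mpr ⟨?_, ih _⟩
    intro a ha
    have := pvB_starts_ge rest (off + PySem.Str.len s + 1) a ha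
    have := pvLen_nonneg s
    omega

-- takeWhile of an all-false list is empty
theorem pvTakeWhile_all_false {α : Type} (p : α → Bool) (l : List α)
    (h : ∀ a ∈ l, p a = false) : l.takeWhile p = [] := by
  cases l with
  | nil => rfl
  | cons x xs => simp [List.takeWhile, h x (List.mem_cons_self)]

-- length of takeWhile is the unique split point
theorem pvTakeWhile_len {α : Type} (p : α → Bool) (l : List α) (k : Nat)
    (hk : k ≤ l.length)
    (htrue : ∀ j (hj : j < l.length), j < k → p l[j] = true)
    (hfalse : ∀ j (hj : j < l.length), k ≤ j → p l[j] = false) :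
    (l.takeWhile p).length = k := by
  induction l generalizing k with
  | nil =>
    simp only [List.length_nil, Nat.le_zero] at hk
    subst hk
    rfl
  | cons x xs ih =>
    cases k with
    | zero =>
      have h0 : p x = false := hfalse 0 (by simp) (by omega)
      simp [List.takeWhile, h0]
    | succ k' =>
      have h0 : p x = true := htrue 0 (by simp) (by omega)
      simp only [List.takeWhile, h0, List.length_cons]
      have := ih k' (by simpa using hk)
        (fun j hj hlt => htrue (j+1) (by simpa using hj) (by omega))
        (fun j hj hle => hfalse (j+1) (by simpa using hj) (by omega))
      omega

-- bisect_right on a sorted list = length of the (· ≤ pos) prefix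
theorem pvBisect_eq_takeWhile (l : List Int) (pos : Int)
    (hs : List.Pairwise (fun a b => a ≤ b) l) :
    PySem.List.bisectRight l pos = (l.takeWhile (fun a => decide (a ≤ pos))).length := by
  obtain ⟨hle, hlo, hhi⟩ := PySem.List.bisectRight_spec l pos hs
  refine (pvTakeWhile_len _ l _ hle ?_ ?_).symm
  · intro j hj hlt; simpa using hlo j hj hlt
  · intro j hj hge; simpa using hhi j hj hge

-- A's loop returns "" once pos is left of the current offset
theorem pvA_small (l : List String) : ∀ (off pos : Int), pos < off → pvA_loop pos off l = "" := by
  induction l with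
  | nil => intro off pos h; rfl
  | cons s rest ih =>
    intro off pos h
    have hl := pvLen_nonneg s
    simp only [pvA_loop]
    rw [if_neg (by omega)]
    exact ih _ _ (by omega)

-- when pos lies at or past the end of block s, the cons-level answer collapses to the tail
theorem pvBAns_cons (pos off : Int) (L : List Int) (s : String) (rest : List String)
    (hge : off ≤ pos) (hout : off + PySem.Str.len s ≤ pos) :
    pvBAns pos (off :: L) (s :: rest) = pvBAns pos L rest := by
  have h1 : (off :: L).takeWhile (fun a => decide (a ≤ pos))
      = off :: L.takeWhile (fun a => decide (a ≤ pos)) := by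
    simp [hge]
  unfold pvBAns
  rw [h1]
  cases hL : (L.takeWhile (fun a => decide (a ≤ pos))).length with
  | zero =>
    simp only [hL, List.length_cons]
    simp
    intro _
    exfalso
    simp only [PySem.Str.len] at hout
    simp at hout
    omega
  | succ j =>
    simp only [hL, List.length_cons]
    rw [if_neg (show ¬(j + 1 + 1 = 0) by omega), if_neg (show ¬(j + 1 = 0) by omega),
        show j + 1 + 1 - 1 = j + 1 from rfl, show j + 1 - 1 = j from rfl]
    simp

-- the core equivalence, generalized over the running offset
theorem pvLoop_eq (sents : List String) (off pos : Int) :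
    pvA_loop pos off sents = pvBAns pos (pvB_starts off sents) sents := by
  induction sents generalizing off with
  | nil => simp [pvA_loop, pvB_starts, pvBAns]
  | cons s rest ih =>
    simp only [pvA_loop, pvB_starts]
    by_cases hge : off ≤ pos
    · by_cases hin : pos < off + PySem.Str.len s
      · -- A returns s; all later starts exceed pos, so k = 1
        have hall : ∀ a ∈ pvB_starts (off + PySem.Str.len s + 1) rest,
            (fun a => decide (a ≤ pos)) a = false := by
          intro a ha
          have := pvB_starts_ge rest (off + PySem.Str.len s + 1) a ha
          simp only [decide_eq_false_iff_not, not_le]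
          omega
        have hnil := pvTakeWhile_all_false _ _ hall
        have hin' : pos < off + (s.length : Int) := by
          simpa [PySem.Str.len] using hin
        rw [if_pos ⟨hge, hin⟩]
        unfold pvBAns
        rw [List.takeWhile_cons]
        simp only [PySem.Str.len, String.length_toList] at hnil
        simp [hge, hnil, hin']
      · -- A skips s; collapse the cons-level answer to the tail
        rw [if_neg (by tauto), ih (off + PySem.Str.len s + 1),
          pvBAns_cons pos off _ s rest hge (by omega)]
    · -- pos is before this block: both sides give ""
      rw [if_neg (by tauto), pvA_small rest _ _ (by have := pvLen_nonneg s; omega)]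
      unfold pvBAns
      rw [List.takeWhile_cons]
      simp [hge]

-- ===== VERDICT (by name: the statement is the Claim_ definition above) =====
theorem find_sentence_for_entity_py_spec : Claim_equal_find_sentence_for_entity_py := by
  intro entity sentences full_text _ _
  unfold Spec_find_sentence_for_entity_py
  simp only [find_sentence_for_entity_py, find_sentence_for_entity_py_alt]
  rw [pvBisect_eq_takeWhile _ _ (pvB_starts_sorted sentences 0)]
  exact pvLoop_eq sentences 0 _
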